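-- pv_equiv track=rewrite | github.com/eduardo-aog/CalculoNumerico | Repositories/BasesConversion.py | __utilValFractionFormat
-- ===== SOURCE A (Python) =====
-- def __utilValFractionFormat(num):
--     n = 0
--     for i in num:
--         if "," in num and (n == 0 and i == ","):
--             return False
--         elif "." in num and (n == 0 and i == "."):
--             return False
--         if ("," in num and "-" in num) and (n == 1 and i == ","):
--             return False
--         elif ("." in num and "-" in num) and (n == 1 and i == "."):
--             return False
--         if i == "," or i == ".":
--             return True
--         n += 1
--     return True
-- ===== SOURCE B (Python) =====
-- def __utilValFractionFormat(num):
--     positions = [num.index(sep) for sep in (",", ".") if sep in num]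
--     if not positions:
--         return True
--     pos = min(positions)
--     if pos == 0:
--         return False
--     if pos == 1 and "-" in num:
--         return False
--     return True
-- ===== Notes on version B (the rewrite author's own statement) =====
-- stated objective: faster
-- what changed: B replaces A's per-character scan (which re-evaluates the ',' / '.' / '-' membership tests on the whole string at every iteration) by a direct computation: collect the first index of each separator present via num.index, take their minimum as the first-separator position, and apply the two guards once.
import Mathlib
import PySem

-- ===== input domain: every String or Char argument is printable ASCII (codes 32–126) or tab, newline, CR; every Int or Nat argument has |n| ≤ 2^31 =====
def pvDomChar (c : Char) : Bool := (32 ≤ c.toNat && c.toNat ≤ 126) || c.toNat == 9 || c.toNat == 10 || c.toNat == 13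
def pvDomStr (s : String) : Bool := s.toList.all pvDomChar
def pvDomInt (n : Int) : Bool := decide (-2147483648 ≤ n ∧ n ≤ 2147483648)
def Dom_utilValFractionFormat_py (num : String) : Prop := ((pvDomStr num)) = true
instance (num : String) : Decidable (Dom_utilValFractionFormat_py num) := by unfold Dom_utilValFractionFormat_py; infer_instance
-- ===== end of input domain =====

-- B locates the first separator via index lookups over the two-element separator set
-- instead of A's per-character scan with a running counter (objective: simpler).

-- ===== PORT A =====
-- A's loop over the characters of num; the `"," in num` / `"." in num` / `"-" in num`
-- tests are re-evaluated inside the loop body on the whole string, as in A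
-- (for a single-character substring, `c in num` is membership of the char in the list).
def pvLoopA (full : List Char) : List Char → Int → Bool
  | [], _ => true
  | i :: rest, n =>
    if full.contains ',' && (n == 0 && i == ',') then false
    else if full.contains '.' && (n == 0 && i == '.') then false
    else if (full.contains ',' && full.contains '-') && (n == 1 && i == ',') then false
    else if (full.contains '.' && full.contains '-') && (n == 1 && i == '.') then false
    else if i == ',' || i == '.' then true
    else pvLoopA full rest (n + 1)

def utilValFractionFormat_py (num : String) : Bool :=
  pvLoopA num.toList num.toList 0

-- ===== PORT B =====
-- [num.index(sep) for sep in (",", ".") if sep in num]; num.index = PySem.Str.find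
-- (only evaluated when sep is present, so it never raises);
-- min(positions) = PySem.List.min? with the identity key.
def utilValFractionFormat_py_alt (num : String) : Bool :=
  let positions : List Int :=
    (([",", "."].filter (fun sep => PySem.Str.isIn sep num)).map
      (fun sep => PySem.Str.find num sep))
  match PySem.List.min? positions (fun x => x) with
  | none => true
  | some pos =>
    if pos == 0 then false
    else if pos == 1 && PySem.Str.isIn "-" num then false
    else true

-- ===== PRECONDITION & SPEC =====
def Spec_utilValFractionFormat_py (num : String) (out : Bool) : Prop := out = utilValFractionFormat_py_alt num
instance (num : String) (out : Bool) : Decidable (Spec_utilValFractionFormat_py num out) := by unfold Spec_utilValFractionFormat_py; infer_instance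

-- ===== CLAIM (what is proved, stated in full; the proofs are below) =====
def Claim_equal_utilValFractionFormat_py : Prop := ∀ (num : String), Dom_utilValFractionFormat_py num → Spec_utilValFractionFormat_py num (utilValFractionFormat_py num)

-- ===== LEMMAS AND PROOFS =====
-- the separator predicate used only by the proofs
def pvSep (c : Char) : Bool := c == ',' || c == '.'

theorem pvLoopA_char (full : List Char) (rest : List Char) (n : Nat)
    (hsub : ∀ c ∈ rest, c ∈ full) :
    pvLoopA full rest (n : Int) =
      match rest.findIdx? pvSep with
      | none => true
      | some k => !((n + k == 0) || (n + k == 1 && full.contains '-')) := by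
  induction rest generalizing n with
  | nil => simp [pvLoopA]
  | cons i t ih =>
    have hin : i ∈ full := hsub i (List.mem_cons_self ..)
    rw [List.findIdx?_cons]
    by_cases hi : pvSep i = true
    · rw [if_pos hi]
      have hcases : i = ',' ∨ i = '.' := by simpa [pvSep] using hi
      rcases hcases with rfl | rfl
      · have hc : full.contains ',' = true := by simpa using hin
        by_cases h0 : n = 0
        · subst h0; simp [pvLoopA, hin]
        · by_cases h1 : n = 1
          · subst h1
            by_cases hdash : full.contains '-' = true
            · have hdm : '-' ∈ full := by simpa using hdash
              simp [pvLoopA, hin, hdm]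
            · have hdm : '-' ∉ full := by simpa using hdash
              simp [pvLoopA, hin, hdm]
          · have e0 : ((n : Int) == 0) = false := by simp; omega
            have e1 : ((n : Int) == 1) = false := by simp; omega
            have f0 : (n == 0) = false := by simp [h0]
            have f1 : (n == 1) = false := by simp [h1]
            simp [pvLoopA, hin, e0, e1, f0, f1]
      · have hc : full.contains '.' = true := by simpa using hin
        by_cases h0 : n = 0
        · subst h0; simp [pvLoopA, hin]
        · by_cases h1 : n = 1
          · subst h1
            by_cases hdash : full.contains '-' = true
            · have hdm : '-' ∈ full := by simpa using hdash
              simp [pvLoopA, hin, hdm]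
            · have hdm : '-' ∉ full := by simpa using hdash
              simp [pvLoopA, hin, hdm]
          · have e0 : ((n : Int) == 0) = false := by simp; omega
            have e1 : ((n : Int) == 1) = false := by simp; omega
            have f0 : (n == 0) = false := by simp [h0]
            have f1 : (n == 1) = false := by simp [h1]
            simp [pvLoopA, hin, e0, e1, f0, f1]
    · rw [if_neg hi]
      have hne : i ≠ ',' ∧ i ≠ '.' := by
        simpa [pvSep, not_or] using hi
      have hcomma : (i == ',') = false := by simp [hne.1]
      have hdot : (i == '.') = false := by simp [hne.2]
      have step : pvLoopA full (i :: t) (n : Int) = pvLoopA full t ((n : Int) + 1) := by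
        simp [pvLoopA, hcomma, hdot]
      rw [step]
      have : ((n : Int) + 1) = ((n + 1 : Nat) : Int) := by push_cast; ring
      rw [this, ih (n + 1) (fun c hc => hsub c (List.mem_cons_of_mem _ hc))]
      cases h : t.findIdx? pvSep with
      | none => simp
      | some k =>
        simp only [Option.map_some]
        have : n + 1 + k = n + (k + 1) := by omega
        rw [this]

theorem find_single (l : List Char) (c : Char) (k : Nat)
    (h : PySem.List.index? l c = some k) :
    PySem.Chars.find l [c] = (k : Int) := by
  obtain ⟨hk, hget, hfirst⟩ := PySem.List.getElem_of_index?_eq_some h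
  have hmem : c ∈ l := hget ▸ l.getElem_mem hk
  have hinf : [c] <:+: l := by
    obtain ⟨s, t, rfl⟩ := List.append_of_mem hmem
    exact ⟨s, t, by simp⟩
  have hne : PySem.Chars.find l [c] ≠ -1 := (PySem.Chars.find_ne_neg_one_iff l [c]).mpr hinf
  have hnn : 0 ≤ PySem.Chars.find l [c] := by
    have := PySem.Chars.neg_one_le_find l [c]
    omega
  obtain ⟨hpre, hmin⟩ := PySem.Chars.find_spec hnn
  set m := (PySem.Chars.find l [c]).toNat with hm
  have hgetm : l[m]? = some c := by
    obtain ⟨t, ht⟩ := hpre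
    have : (l.drop m)[0]? = some c := by rw [← ht]; simp
    simpa using this
  have hmlt : m < l.length := (List.getElem?_eq_some_iff.mp hgetm).1
  have hmem_m : l[m]'hmlt = c := by
    have := List.getElem?_eq_some_iff.mp hgetm
    obtain ⟨_, hv⟩ := this
    exact hv
  have hmk : m = k := by
    by_contra hne2
    rcases Nat.lt_or_ge m k with hlt | hge
    · exact hfirst m hlt hmem_m
    · have hklt : k < m := by omega
      apply hmin k hklt
      have hdk : l.drop k = c :: l.drop (k + 1) := by
        rw [← hget]
        exact (List.getElem_cons_drop hk).symm
      exact ⟨l.drop (k + 1), by simp [hdk]⟩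
  have : PySem.Chars.find l [c] = (m : Int) := (Int.toNat_of_nonneg hnn).symm
  rw [this, hmk]

theorem findIdx?_sep (l : List Char) :
    l.findIdx? pvSep =
      match PySem.List.index? l ',', PySem.List.index? l '.' with
      | none, none => none
      | some a, none => some a
      | none, some b => some b
      | some a, some b => some (min a b) := by
  induction l with
  | nil => simp [PySem.List.index?_eq_idxOf?]
  | cons x t ih =>
    rw [List.findIdx?_cons]
    by_cases hx : pvSep x = true
    · rw [if_pos hx]
      have hcases : x = ',' ∨ x = '.' := by simpa [pvSep] using hx
      rcases hcases with rfl | rfl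
      · rw [PySem.List.index?_cons_self]
        rw [PySem.List.index?_cons_of_ne (x := ',') (v := '.') (xs := t) (by decide)]
        cases h : PySem.List.index? t '.' <;> simp
      · rw [PySem.List.index?_cons_self]
        rw [PySem.List.index?_cons_of_ne (x := '.') (v := ',') (xs := t) (by decide)]
        cases h : PySem.List.index? t ',' <;> simp
    · rw [if_neg hx]
      have hne : x ≠ ',' ∧ x ≠ '.' := by simpa [pvSep, not_or] using hx
      rw [PySem.List.index?_cons_of_ne (x := x) (v := ',') (xs := t) hne.1,
        PySem.List.index?_cons_of_ne (x := x) (v := '.') (xs := t) hne.2, ih]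
      cases ha : PySem.List.index? t ',' <;> cases hb : PySem.List.index? t '.' <;>
        simp

theorem pvIsIn (c : Char) (l : List Char) : PySem.Chars.isIn [c] l = true ↔ c ∈ l := by
  rw [PySem.Chars.isIn_iff_infix]
  constructor
  · intro h; exact h.subset (by simp)
  · intro h
    obtain ⟨s, t, rfl⟩ := List.append_of_mem h
    exact ⟨s, t, by simp⟩

theorem pvMain (num : String) :
    pvLoopA num.toList num.toList 0 = utilValFractionFormat_py_alt num := by
  have hA := pvLoopA_char num.toList num.toList 0 (fun c hc => hc)
  simp only [Nat.cast_zero, Nat.zero_add] at hA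
  rw [hA, findIdx?_sep]
  have lit_c : ("," : String).toList = [','] := rfl
  have lit_d : ("." : String).toList = ['.'] := rfl
  have lit_m : ("-" : String).toList = ['-'] := rfl
  have hChars : ∀ c : Char, PySem.Chars.isIn [c] num.toList = decide (c ∈ num.toList) := by
    intro c
    by_cases h : c ∈ num.toList
    · simp [(pvIsIn c num.toList).mpr h, h]
    · have hf : PySem.Chars.isIn [c] num.toList = false :=
        Bool.eq_false_iff.mpr (fun hh => h ((pvIsIn c num.toList).mp hh))
      simp [hf, h]
  cases hc : PySem.List.index? num.toList ',' with
  | none =>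
    have hcm : ',' ∉ num.toList := by
      rw [← PySem.List.index?_eq_none_iff (xs := num.toList) (v := ',')]; exact hc
    cases hd : PySem.List.index? num.toList '.' with
    | none =>
      have hdm : '.' ∉ num.toList := by
        rw [← PySem.List.index?_eq_none_iff (xs := num.toList) (v := '.')]; exact hd
      simp [utilValFractionFormat_py_alt, lit_c, lit_d, hChars, hcm, hdm,
        PySem.List.min?]
    | some b =>
      have hbm : '.' ∈ num.toList := by
        have := PySem.List.index?_isSome_iff (xs := num.toList) (v := '.')
        exact this.mp (by rw [hd]; rfl)
      have hfd : PySem.Chars.find num.toList ['.'] = (b : Int) := find_single _ _ _ hd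
      by_cases h0 : b = 0 <;> by_cases h1 : b = 1 <;> by_cases hm : '-' ∈ num.toList <;>
        simp [utilValFractionFormat_py_alt, lit_c, lit_d, lit_m, hChars, hcm, hbm, hfd,
          PySem.List.min?_id_cons, h0, h1, hm]
  | some a =>
    have ham : ',' ∈ num.toList := by
      have := PySem.List.index?_isSome_iff (xs := num.toList) (v := ',')
      exact this.mp (by rw [hc]; rfl)
    have hfc : PySem.Chars.find num.toList [','] = (a : Int) := find_single _ _ _ hc
    cases hd : PySem.List.index? num.toList '.' with
    | none =>
      have hdm : '.' ∉ num.toList := by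
        rw [← PySem.List.index?_eq_none_iff (xs := num.toList) (v := '.')]; exact hd
      by_cases h0 : a = 0 <;> by_cases h1 : a = 1 <;> by_cases hm : '-' ∈ num.toList <;>
        simp [utilValFractionFormat_py_alt, lit_c, lit_d, lit_m, hChars, ham, hdm, hfc,
          PySem.List.min?_id_cons, h0, h1, hm]
    | some b =>
      have hbm : '.' ∈ num.toList := by
        have := PySem.List.index?_isSome_iff (xs := num.toList) (v := '.')
        exact this.mp (by rw [hd]; rfl)
      have hfd : PySem.Chars.find num.toList ['.'] = (b : Int) := find_single _ _ _ hd
      have hm2 : PySem.List.min? [(a : Int), (b : Int)] (fun x => x)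
          = some ((min a b : Nat) : Int) := by
        simp only [PySem.List.min?_id_cons, List.foldl]
        congr 1
        rw [Int.min_def]
        split_ifs <;> push_cast <;> omega
      by_cases h0 : min a b = 0 <;> by_cases h1 : min a b = 1 <;>
          by_cases hm : '-' ∈ num.toList <;>
        simp [utilValFractionFormat_py_alt, lit_c, lit_d, lit_m, hChars, ham, hbm, hfc, hfd,
          hm2, h0, h1, hm] <;>
        simp only [← Nat.cast_min, Nat.cast_eq_zero, Nat.cast_eq_one] <;>
        simp [h0, h1]

-- ===== VERDICT (by name: the statement is the Claim_ definition above) =====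
theorem utilValFractionFormat_py_spec : Claim_equal_utilValFractionFormat_py := by
  intro num _
  unfold Spec_utilValFractionFormat_py utilValFractionFormat_py
  exact pvMain num
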